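-- pv_equiv track=rewrite | github.com/samc5/BUDining | scraper.py | sort_items_by_station
-- ===== SOURCE A (Python) =====
-- def sort_items_by_station(menu): #sort the results of a get_gf_vegetarian_menu call by station, into a dictionary
--     ans = {}
--     for i in menu:
--         station = i[2].strip()
--         if station in ans:
--             ans[station].append(i)
--         else:
--             ans[station] = [i]
--     return ans
-- ===== SOURCE B (Python) =====
-- def sort_items_by_station(menu): #sort the results of a get_gf_vegetarian_menu call by station, into a dictionary
--     stations = list(dict.fromkeys(i[2].strip() for i in menu))
--     return {s: [i for i in menu if i[2].strip() == s] for s in stations}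
-- ===== Notes on version B (the rewrite author's own statement) =====
-- stated objective: alternative
-- what changed: A builds the dict in one pass, appending each item to its station's list as it goes; B first dedups the stripped station names in first-occurrence order (dict.fromkeys) and then builds each station's list with one filter of the menu per station.
import Mathlib
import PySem

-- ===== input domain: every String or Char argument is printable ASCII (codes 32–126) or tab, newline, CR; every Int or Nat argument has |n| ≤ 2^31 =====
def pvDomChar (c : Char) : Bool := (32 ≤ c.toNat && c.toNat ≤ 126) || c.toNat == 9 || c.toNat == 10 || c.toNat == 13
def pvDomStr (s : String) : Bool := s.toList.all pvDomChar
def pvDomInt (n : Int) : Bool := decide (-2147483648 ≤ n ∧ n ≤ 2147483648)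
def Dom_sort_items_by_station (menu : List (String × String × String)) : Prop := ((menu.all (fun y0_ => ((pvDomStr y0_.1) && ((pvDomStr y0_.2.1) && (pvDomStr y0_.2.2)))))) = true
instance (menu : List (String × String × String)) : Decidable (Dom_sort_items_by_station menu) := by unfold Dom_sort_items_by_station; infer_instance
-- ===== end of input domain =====

-- B replaces A's one-pass per-item dict accumulation by a dedup-the-keys pass followed by
-- one filter of the menu per station (same key order, same values); objective: alternative.

-- ===== PORT A =====
-- literal transliteration of A: a dict built item by item (append if the stripped
-- station is already a key, else a fresh singleton entry); the returned dict is its items list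
def sort_items_by_station (menu : List (String × String × String)) : List (String × List (String × String × String)) :=
  (menu.foldl
    (fun ans i =>
      let station := PySem.Str.strip i.2.2
      if ans.contains station then
        ans.modify station [] (fun l => l ++ [i])
      else
        ans.insert station [i])
    PySem.Dict.empty).items

-- ===== PORT B =====
-- literal transliteration of B: distinct stripped stations in first-occurrence order
-- (dict.fromkeys = PySem.List.dedup), then one filter of menu per station
def sort_items_by_station_alt (menu : List (String × String × String)) : List (String × List (String × String × String)) :=
  let stations := PySem.List.dedup (menu.map (fun i => PySem.Str.strip i.2.2))
  stations.map (fun s => (s, menu.filter (fun i => PySem.Str.strip i.2.2 == s)))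

-- ===== PRECONDITION & SPEC =====
def Spec_sort_items_by_station (menu : List (String × String × String)) (out : List (String × List (String × String × String))) : Prop := out = sort_items_by_station_alt menu
instance (menu : List (String × String × String)) (out : List (String × List (String × String × String))) : Decidable (Spec_sort_items_by_station menu out) := by unfold Spec_sort_items_by_station; infer_instance

-- ===== CLAIM (what is proved, stated in full; the proofs are below) =====
def Claim_equal_sort_items_by_station : Prop := ∀ (menu : List (String × String × String)), Dom_sort_items_by_station menu → Spec_sort_items_by_station menu (sort_items_by_station menu)

-- ===== LEMMAS AND PROOFS =====

-- A's if/contains branch is exactly dict.modify with default []: when the key is absent,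
-- modify appends (k, [] ++ [i]) = insert k [i]
theorem stepA_eq_modify (ans : PySem.Dict String (List (String × String × String)))
    (i : String × String × String) :
    (let station := PySem.Str.strip i.2.2
     if ans.contains station then ans.modify station [] (fun l => l ++ [i])
     else ans.insert station [i])
    = ans.modify (PySem.Str.strip i.2.2) [] (fun l => l ++ [i]) := by
  by_cases h : ans.contains (PySem.Str.strip i.2.2)
  · simp [h]
  · simp only [Bool.not_eq_true] at h
    simp [PySem.Dict.modify, PySem.Dict.getD_of_not_contains, h]

-- items of a Nodup-keyed dict are its keys paired with their values
theorem items_eq_keys_map {ν : Type} (d : PySem.Dict String (List ν)) (h : d.keys.Nodup) :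
    d.items = d.keys.map (fun k => (k, d.getD k [])) := by
  simp only [PySem.Dict.keys, List.map_map]
  symm
  conv_rhs => rw [← List.map_id d.items]
  apply List.map_congr_left
  intro p hp
  obtain ⟨k, v⟩ := p
  simp [PySem.Dict.getD_of_mem_items d hp h]

-- the core equality: A's loop, read off as items, is B's dedup-then-filter table
theorem loop_items_eq (menu : List (String × String × String)) :
    sort_items_by_station menu = sort_items_by_station_alt menu := by
  unfold sort_items_by_station sort_items_by_station_alt
  rw [show (fun (ans : PySem.Dict String (List (String × String × String))) i =>
        let station := PySem.Str.strip i.2.2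
        if ans.contains station then ans.modify station [] (fun l => l ++ [i])
        else ans.insert station [i])
      = (fun ans i => ans.modify (PySem.Str.strip i.2.2) [] (fun l => l ++ [i]))
      from funext fun ans => funext fun i => stepA_eq_modify ans i]
  have hnodup : (menu.foldl (fun ans i => ans.modify (PySem.Str.strip i.2.2) [] (fun l => l ++ [i])) PySem.Dict.empty).keys.Nodup :=
    PySem.Dict.nodup_keys_foldl_modify_key menu (fun i => PySem.Str.strip i.2.2) []
      (fun _ i => (fun l => l ++ [i])) PySem.Dict.empty PySem.Dict.nodup_keys_empty
  rw [items_eq_keys_map _ hnodup]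
  rw [PySem.Dict.keys_foldl_modify_key menu (fun i => PySem.Str.strip i.2.2) []
      (fun _ i => (fun l => l ++ [i])) PySem.Dict.empty]
  rw [PySem.List.dedup_eq_ofList]
  simp only [PySem.Dict.keys_empty]
  rw [PySem.Set.update_nil_left]
  apply List.map_congr_left
  intro s _
  have hfold : (menu.foldl (fun ans i => ans.modify (PySem.Str.strip i.2.2) [] (fun l => l ++ [i])) PySem.Dict.empty)
      = ((menu.map (fun i => (PySem.Str.strip i.2.2, i))).foldl
          (fun d p => d.modify p.1 [] (fun l => l ++ [p.2])) PySem.Dict.empty) := by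
    rw [List.foldl_map]
  rw [hfold, PySem.Dict.getD_foldl_modify_append]
  simp [List.filter_map, Function.comp_def]

-- ===== VERDICT (by name: the statement is the Claim_ definition above) =====
theorem sort_items_by_station_spec : Claim_equal_sort_items_by_station := by
  intro menu _
  unfold Spec_sort_items_by_station
  exact loop_items_eq menu
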